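-- pv_equiv track=rewrite | github.com/Whem/lotteryGuesser | src/LotteryGuesserDjango/processors/number_grouping_prediction.py | analyze_group_patterns
-- ===== SOURCE A (Python) =====
-- from collections import defaultdict, Counter
-- from typing import List, Dict, Tuple
--
-- def analyze_group_patterns(
--         past_draws: List[List[int]],
--         min_num: int,
--         max_num: int
-- ) -> Counter:
--     """Analyze patterns in number groups from historical draws."""
--     group_size = (max_num - min_num + 1) // 3
--     groups = {
--         'low': range(min_num, min_num + group_size),
--         'mid': range(min_num + group_size, min_num + 2 * group_size),
--         'high': range(min_num + 2 * group_size, max_num + 1)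
--     }
--
--     patterns = Counter()
--     for draw in past_draws:
--         pattern = ''.join(sorted([get_group(num, groups) for num in draw]))
--         patterns[pattern] += 1
--
--     return patterns
--
-- def get_group(number: int, groups: Dict[str, range]) -> str:
--     """Determine which group a number belongs to."""
--     for group, range_ in groups.items():
--         if number in range_:
--             return group[0]  # Return first letter of group name
--     return 'x'  # Should never happen
-- ===== SOURCE B (Python) =====
-- def analyze_group_patterns(past_draws, min_num, max_num):
--     """Tally how many numbers of each draw fall in the low/mid/high bands and
--     build the sorted pattern string directly from the four tallies."""
--     group_size = (max_num - min_num + 1) // 3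
--     b1 = min_num + group_size
--     b2 = min_num + 2 * group_size
--     patterns = {}
--     for draw in past_draws:
--         h = l = m = x = 0
--         for num in draw:
--             if min_num <= num < b1:
--                 l += 1
--             elif b1 <= num < b2:
--                 m += 1
--             elif b2 <= num <= max_num:
--                 h += 1
--             else:
--                 x += 1
--         pattern = 'h' * h + 'l' * l + 'm' * m + 'x' * x
--         patterns[pattern] = patterns.get(pattern, 0) + 1
--     return patterns
-- ===== Notes on version B (the rewrite author's own statement) =====
-- stated objective: faster
-- what changed: Per draw, B replaces building a list of group letters and sorting it with four tallies (low/mid/high/other) kept in one pass, concatenating the pattern string directly in alphabetical order; the Counter is replaced by a plain dict with get.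
import Mathlib
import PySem

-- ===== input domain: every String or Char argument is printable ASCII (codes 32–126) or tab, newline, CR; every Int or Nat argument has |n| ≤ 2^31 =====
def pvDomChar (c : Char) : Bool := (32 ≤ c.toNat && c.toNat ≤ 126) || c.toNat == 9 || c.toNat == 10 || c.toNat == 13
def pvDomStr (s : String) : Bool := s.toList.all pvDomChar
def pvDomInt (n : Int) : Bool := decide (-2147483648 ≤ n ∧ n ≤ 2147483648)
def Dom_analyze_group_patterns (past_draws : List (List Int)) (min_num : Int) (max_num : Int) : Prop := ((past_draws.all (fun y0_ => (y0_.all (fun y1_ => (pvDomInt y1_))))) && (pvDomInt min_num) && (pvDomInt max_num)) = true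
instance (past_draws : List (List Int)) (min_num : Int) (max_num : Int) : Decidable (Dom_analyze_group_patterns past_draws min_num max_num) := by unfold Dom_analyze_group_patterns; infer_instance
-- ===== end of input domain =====

-- B tallies the three bands in one pass per draw and builds the sorted pattern string
-- directly, instead of sorting a list of group letters (objective: faster, measured).

-- ===== PORT A =====
-- get_group(number, groups): the three range checks in dict order, first letter of the name
def pvGetGroup (minn gs maxn : Int) (number : Int) : Char :=
  if minn ≤ number ∧ number < minn + gs then 'l'
  else if minn + gs ≤ number ∧ number < minn + 2 * gs then 'm'
  else if minn + 2 * gs ≤ number ∧ number < maxn + 1 then 'h'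
  else 'x'

def analyze_group_patterns (past_draws : List (List Int)) (min_num : Int) (max_num : Int) : List (String × Int) :=
  let group_size := PySem.Int.floordiv (max_num - min_num + 1) 3
  (past_draws.foldl (fun (patterns : PySem.Dict String Int) draw =>
      let pattern := String.mk (PySem.List.sorted (draw.map (pvGetGroup min_num group_size max_num)) (fun c => c) false)
      patterns.modify pattern 0 (· + 1))
    PySem.Dict.empty).items

-- ===== PORT B =====
-- the inner tally loop of Source B: (h, l, m, x) counts for one draw
def pvTally (minn b1 b2 maxn : Int) (draw : List Int) : Int × Int × Int × Int :=
  draw.foldl (fun (acc : Int × Int × Int × Int) num =>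
    let (h, l, m, x) := acc
    if minn ≤ num ∧ num < b1 then (h, l + 1, m, x)
    else if b1 ≤ num ∧ num < b2 then (h, l, m + 1, x)
    else if b2 ≤ num ∧ num ≤ maxn then (h + 1, l, m, x)
    else (h, l, m, x + 1)) (0, 0, 0, 0)

def analyze_group_patterns_alt (past_draws : List (List Int)) (min_num : Int) (max_num : Int) : List (String × Int) :=
  let group_size := PySem.Int.floordiv (max_num - min_num + 1) 3
  let b1 := min_num + group_size
  let b2 := min_num + 2 * group_size
  (past_draws.foldl (fun (patterns : PySem.Dict String Int) draw =>
      let (h, l, m, x) := pvTally min_num b1 b2 max_num draw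
      let pattern := String.mk (List.replicate h.toNat 'h' ++ List.replicate l.toNat 'l'
                     ++ List.replicate m.toNat 'm' ++ List.replicate x.toNat 'x')
      patterns.insert pattern (patterns.getD pattern 0 + 1))
    PySem.Dict.empty).items

-- ===== PRECONDITION & SPEC =====
def Spec_analyze_group_patterns (past_draws : List (List Int)) (min_num : Int) (max_num : Int) (out : List (String × Int)) : Prop := out = analyze_group_patterns_alt past_draws min_num max_num
instance (past_draws : List (List Int)) (min_num : Int) (max_num : Int) (out : List (String × Int)) : Decidable (Spec_analyze_group_patterns past_draws min_num max_num out) := by unfold Spec_analyze_group_patterns; infer_instance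

-- ===== CLAIM (what is proved, stated in full; the proofs are below) =====
def Claim_equal_analyze_group_patterns : Prop := ∀ (past_draws : List (List Int)) (min_num : Int) (max_num : Int), Dom_analyze_group_patterns past_draws min_num max_num → Spec_analyze_group_patterns past_draws min_num max_num (analyze_group_patterns past_draws min_num max_num)

-- ===== LEMMAS AND PROOFS =====

-- the tally fold counts, per branch, how many elements of the draw satisfy it
theorem pvTally_invariant (minn b1 b2 maxn : Int) (draw : List Int) (acc : Int × Int × Int × Int) :
    draw.foldl (fun (acc : Int × Int × Int × Int) num =>
      let (h, l, m, x) := acc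
      if minn ≤ num ∧ num < b1 then (h, l + 1, m, x)
      else if b1 ≤ num ∧ num < b2 then (h, l, m + 1, x)
      else if b2 ≤ num ∧ num ≤ maxn then (h + 1, l, m, x)
      else (h, l, m, x + 1)) acc
    = (acc.1 + (draw.countP (fun n => decide (¬(minn ≤ n ∧ n < b1) ∧ ¬(b1 ≤ n ∧ n < b2) ∧ (b2 ≤ n ∧ n ≤ maxn)))),
       acc.2.1 + (draw.countP (fun n => decide (minn ≤ n ∧ n < b1))),
       acc.2.2.1 + (draw.countP (fun n => decide (¬(minn ≤ n ∧ n < b1) ∧ (b1 ≤ n ∧ n < b2)))),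
       acc.2.2.2 + (draw.countP (fun n => decide (¬(minn ≤ n ∧ n < b1) ∧ ¬(b1 ≤ n ∧ n < b2) ∧ ¬(b2 ≤ n ∧ n ≤ maxn))))) := by
  induction draw generalizing acc with
  | nil => simp
  | cons a t ih =>
    obtain ⟨h, l, m, x⟩ := acc
    by_cases h1 : minn ≤ a ∧ a < b1
    · simp [List.foldl_cons, ih, h1]; ring_nf
    · by_cases h2 : b1 ≤ a ∧ a < b2
      · simp [List.foldl_cons, ih, h1, h2]; ring_nf
      · by_cases h3 : b2 ≤ a ∧ a ≤ maxn
        · simp [List.foldl_cons, ih, List.countP_cons, h1, h2, h3]; ring_nf; omega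
        · simp [List.foldl_cons, ih, List.countP_cons, h1, h2, h3]; ring_nf; omega

-- sorted over letters drawn from {'h','l','m','x'} is the four replicate blocks
theorem sorted_hlmx (cs : List Char) (hmem : ∀ c ∈ cs, c = 'h' ∨ c = 'l' ∨ c = 'm' ∨ c = 'x') :
    PySem.List.sorted cs (fun c => c) false
      = List.replicate (cs.count 'h') 'h' ++ List.replicate (cs.count 'l') 'l'
        ++ List.replicate (cs.count 'm') 'm' ++ List.replicate (cs.count 'x') 'x' := by
  apply PySem.List.sorted_id_eq_of_perm_of_pairwise
  · apply List.perm_iff_count.mpr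
    intro a
    by_cases ha : a = 'h' ∨ a = 'l' ∨ a = 'm' ∨ a = 'x'
    · rcases ha with h | h | h | h <;> subst h <;>
        simp [List.count_append, List.count_replicate]
    · push_neg at ha
      obtain ⟨h1, h2, h3, h4⟩ := ha
      have hnot : a ∉ cs := fun hin => by rcases hmem a hin with h | h | h | h <;> simp_all
      simp [List.count_append, List.count_replicate,
        List.count_eq_zero_of_not_mem hnot]
      exact ⟨fun h => absurd h.symm h1, fun h => absurd h.symm h2,
        fun h => absurd h.symm h3, fun h => absurd h.symm h4⟩
  · have hrep : ∀ (n : Nat) (c : Char), List.Pairwise (fun a b : Char => a ≤ b) (List.replicate n c) :=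
      fun n c => List.pairwise_replicate.mpr (Or.inr le_rfl)
    simp only [List.pairwise_append, List.mem_append, List.mem_replicate]
    refine ⟨⟨⟨hrep _ _, hrep _ _, ?_⟩, hrep _ _, ?_⟩, hrep _ _, ?_⟩
    · rintro a ⟨-, rfl⟩ b ⟨-, rfl⟩; decide
    · rintro a (⟨-, rfl⟩ | ⟨-, rfl⟩) b ⟨-, rfl⟩ <;> decide
    · rintro a ((⟨-, rfl⟩ | ⟨-, rfl⟩) | ⟨-, rfl⟩) b ⟨-, rfl⟩ <;> decide

-- per draw, A's sorted-join pattern equals B's tally pattern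
theorem pattern_eq (minn gs maxn : Int) (draw : List Int) :
    String.mk (PySem.List.sorted (draw.map (pvGetGroup minn gs maxn)) (fun c => c) false)
      = (let (h, l, m, x) := pvTally minn (minn + gs) (minn + 2 * gs) maxn draw
         String.mk (List.replicate h.toNat 'h' ++ List.replicate l.toNat 'l'
           ++ List.replicate m.toNat 'm' ++ List.replicate x.toNat 'x')) := by
  have hmem : ∀ c ∈ draw.map (pvGetGroup minn gs maxn), c = 'h' ∨ c = 'l' ∨ c = 'm' ∨ c = 'x' := by
    intro c hc
    simp only [List.mem_map] at hc
    obtain ⟨n, -, rfl⟩ := hc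
    unfold pvGetGroup
    split_ifs <;> simp
  have hcount : ∀ c : Char, (draw.map (pvGetGroup minn gs maxn)).count c
      = draw.countP (fun n => pvGetGroup minn gs maxn n == c) := by
    intro c
    simp [List.count_eq_countP, List.countP_map]
    rfl
  rw [sorted_hlmx _ hmem]
  have eh : List.count 'h' (draw.map (pvGetGroup minn gs maxn))
      = ((0 : Int) + ((draw.countP (fun n => decide (¬(minn ≤ n ∧ n < minn + gs) ∧ ¬(minn + gs ≤ n ∧ n < minn + 2 * gs) ∧ (minn + 2 * gs ≤ n ∧ n ≤ maxn)))) : Int)).toNat := by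
    have hc : draw.countP (fun n => pvGetGroup minn gs maxn n == 'h')
        = draw.countP (fun n => decide (¬(minn ≤ n ∧ n < minn + gs) ∧ ¬(minn + gs ≤ n ∧ n < minn + 2 * gs) ∧ (minn + 2 * gs ≤ n ∧ n ≤ maxn))) := by
      apply List.countP_congr; intro n _
      unfold pvGetGroup
      split_ifs with c1 c2 c3 <;> simp_all <;> omega
    rw [hcount, hc]; omega
  have el : List.count 'l' (draw.map (pvGetGroup minn gs maxn))
      = ((0 : Int) + ((draw.countP (fun n => decide (minn ≤ n ∧ n < minn + gs))) : Int)).toNat := by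
    have hc : draw.countP (fun n => pvGetGroup minn gs maxn n == 'l')
        = draw.countP (fun n => decide (minn ≤ n ∧ n < minn + gs)) := by
      apply List.countP_congr; intro n _
      unfold pvGetGroup
      split_ifs with c1 c2 c3 <;> simp_all
    rw [hcount, hc]; omega
  have em : List.count 'm' (draw.map (pvGetGroup minn gs maxn))
      = ((0 : Int) + ((draw.countP (fun n => decide (¬(minn ≤ n ∧ n < minn + gs) ∧ (minn + gs ≤ n ∧ n < minn + 2 * gs)))) : Int)).toNat := by
    have hc : draw.countP (fun n => pvGetGroup minn gs maxn n == 'm')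
        = draw.countP (fun n => decide (¬(minn ≤ n ∧ n < minn + gs) ∧ (minn + gs ≤ n ∧ n < minn + 2 * gs))) := by
      apply List.countP_congr; intro n _
      unfold pvGetGroup
      split_ifs with c1 c2 c3 <;> simp_all
    rw [hcount, hc]; omega
  have ex : List.count 'x' (draw.map (pvGetGroup minn gs maxn))
      = ((0 : Int) + ((draw.countP (fun n => decide (¬(minn ≤ n ∧ n < minn + gs) ∧ ¬(minn + gs ≤ n ∧ n < minn + 2 * gs) ∧ ¬(minn + 2 * gs ≤ n ∧ n ≤ maxn)))) : Int)).toNat := by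
    have hc : draw.countP (fun n => pvGetGroup minn gs maxn n == 'x')
        = draw.countP (fun n => decide (¬(minn ≤ n ∧ n < minn + gs) ∧ ¬(minn + gs ≤ n ∧ n < minn + 2 * gs) ∧ ¬(minn + 2 * gs ≤ n ∧ n ≤ maxn))) := by
      apply List.countP_congr; intro n _
      unfold pvGetGroup
      split_ifs with c1 c2 c3 <;> simp_all <;> omega
    rw [hcount, hc]; omega
  have htally := pvTally_invariant minn (minn + gs) (minn + 2 * gs) maxn draw (0, 0, 0, 0)
  unfold pvTally
  rw [htally]
  dsimp only
  rw [eh, el, em, ex]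

-- ===== VERDICT (by name: the statement is the Claim_ definition above) =====
theorem analyze_group_patterns_spec : Claim_equal_analyze_group_patterns := by
  intro past_draws min_num max_num _
  unfold Spec_analyze_group_patterns analyze_group_patterns analyze_group_patterns_alt
  dsimp only
  congr 1
  apply PySem.List.foldl_congr_mem
  intro d draw _
  have hpat := pattern_eq min_num (PySem.Int.floordiv (max_num - min_num + 1) 3) max_num draw
  rcases hT : pvTally min_num (min_num + PySem.Int.floordiv (max_num - min_num + 1) 3)
      (min_num + 2 * PySem.Int.floordiv (max_num - min_num + 1) 3) max_num draw with ⟨h, l, m, x⟩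
  rw [hT] at hpat
  simp only [PySem.Dict.modify, hpat]
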